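-- pv_equiv track=rewrite | github.com/IwonskiI/codetree-TILs | 240408/코드트리 메신저/codetree-messenger.py | dfs
-- ===== SOURCE A (Python) =====
-- from collections import deque
--
-- def dfs(start, c, p):
--     depth = 0
--     stack = deque([[start, depth]])
--     answer = 0
--
--     while stack:
--         n, d = stack.pop()
--         if n not in c:
--             continue
--         for child in c[n]:
--             stack.append([child, d + 1])
--             if p[child][1] > d:
--                 answer += 1
--
--     return answer
-- ===== SOURCE B (Python) =====
-- def dfs(start, c, p):
--     # recursive DFS: subtree counts via the call stack instead of an explicit deque
--     if start not in c:
--         return 0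
--
--     def visit(d, children):
--         total = 0
--         for ch in children:
--             if p[ch][1] > d:
--                 total += 1
--             if ch in c:
--                 total += visit(d + 1, c[ch])
--         return total
--
--     return visit(0, c[start])
-- ===== Notes on version B (the rewrite author's own statement) =====
-- stated objective: alternative
-- what changed: Replaces the explicit deque-based iterative stack loop with a recursive DFS helper that returns each subtree's count directly via the call stack.
import Mathlib
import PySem

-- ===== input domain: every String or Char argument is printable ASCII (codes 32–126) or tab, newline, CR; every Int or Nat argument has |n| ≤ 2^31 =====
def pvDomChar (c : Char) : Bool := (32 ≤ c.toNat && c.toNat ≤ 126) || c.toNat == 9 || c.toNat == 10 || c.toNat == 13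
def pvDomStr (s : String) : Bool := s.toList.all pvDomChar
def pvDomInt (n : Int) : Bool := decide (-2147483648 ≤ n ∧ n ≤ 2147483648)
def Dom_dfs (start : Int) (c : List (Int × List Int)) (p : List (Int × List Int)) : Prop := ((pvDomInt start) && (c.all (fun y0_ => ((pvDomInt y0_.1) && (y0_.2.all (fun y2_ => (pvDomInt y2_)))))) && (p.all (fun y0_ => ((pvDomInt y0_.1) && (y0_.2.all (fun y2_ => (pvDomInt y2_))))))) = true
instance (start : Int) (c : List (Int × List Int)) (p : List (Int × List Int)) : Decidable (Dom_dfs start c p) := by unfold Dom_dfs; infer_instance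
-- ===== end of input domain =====

-- B re-implements A's explicit-stack traversal as a recursive DFS over subtrees (different decomposition, same cost).
-- A diverges on reachable cycles; both ports carry fuel as a pure totality device, proved inert on Pre_dfs inputs.

-- shared dict primitive: first-match association-list lookup (Python dict lookup)
def alget : List (Int × List Int) → Int → Option (List Int)
  | [], _ => none
  | kv :: rest, k => if kv.1 = k then some kv.2 else alget rest k

-- p[child][1] (Pre_ guarantees the entry exists with length ≥ 2, so the defaults are never used)
def pval (p : List (Int × List Int)) (ch : Int) : Int := ((alget p ch).getD []).getD 1 0

-- ===== PORT A =====
-- stack with head = top (deque push/pop on the right); fuel only totalizes the while-loop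
def dfsRun (c p : List (Int × List Int)) : Nat → List (Int × Int) → Int → Int
  | 0, _, ans => ans
  | _ + 1, [], ans => ans
  | f + 1, (n, d) :: rest, ans =>
    match alget c n with
    | none => dfsRun c p f rest ans
    | some children =>
      let s := children.foldl
        (fun (s : List (Int × Int) × Int) ch =>
          ((ch, d + 1) :: s.1, s.2 + if pval p ch > d then 1 else 0)) (rest, ans)
      dfsRun c p f s.1 s.2

def dfsFuel (c : List (Int × List Int)) : Nat :=
  1 + ((c.map (fun kv => kv.2.length)).sum + 1) ^ (c.length + 1)

def dfs (start : Int) (c : List (Int × List Int)) (p : List (Int × List Int)) : Int :=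
  dfsRun c p (dfsFuel c) [(start, 0)] 0

-- ===== PORT B =====
-- the loop body of B's visit: one pass over the children, adding 1 per deep-enough child
-- and recursing into children that are keys of c; fuel only totalizes the key-recursion
def visitGo (c p : List (Int × List Int)) : Nat → Int → List Int → Int
  | _, _, [] => 0
  | f, d, ch :: rest =>
    (if pval p ch > d then 1 else 0)
    + (match f, alget c ch with
       | f' + 1, some l => visitGo c p f' (d + 1) l
       | _, _ => 0)
    + visitGo c p f d rest
termination_by f _ l => (f, l.length)
decreasing_by
  · exact Prod.Lex.left _ _ (Nat.lt_succ_self _)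
  · exact Prod.Lex.right _ (by simp)

def dfs_alt (start : Int) (c : List (Int × List Int)) (p : List (Int × List Int)) : Int :=
  match alget c start with
  | none => 0
  | some children => visitGo c p (c.length + 1) 0 children

-- ===== PRECONDITION & SPEC =====
-- reachability closure used by Pre_dfs: reachL computes (as a plain list, possibly with repeats) the set of
-- nodes reachable from start in the graph c — a fixpoint of one expand-by-children step, not a port's traversal.
def stepL (c : List (Int × List Int)) (s : List Int) : List Int :=
  s ++ (c.filter (fun kv => decide (kv.1 ∈ s))).flatMap (fun kv => kv.2)

def reachL (c : List (Int × List Int)) (start : Int) : List Int :=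
  (stepL c)^[c.length + 1] [start]

-- Pre_dfs excludes exactly the inputs on which A does not return a value: (a) graphs with a cycle reachable
-- from start (a reachable key that is reachable from one of its own children), on which A loops forever;
-- (b) inputs where some child of a reachable key has no p entry of length ≥ 2, on which A raises
-- KeyError/IndexError at p[child][1].
def Pre_dfs (start : Int) (c : List (Int × List Int)) (p : List (Int × List Int)) : Prop :=
  ∀ kv ∈ c, kv.1 ∈ reachL c start →
    ∀ ch ∈ kv.2, kv.1 ∉ reachL c ch ∧
      2 ≤ (((p.find? (fun q => q.1 == ch)).map Prod.snd).getD []).length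
instance (start : Int) (c : List (Int × List Int)) (p : List (Int × List Int)) : Decidable (Pre_dfs start c p) := by unfold Pre_dfs; infer_instance

def pvWitness_dfs : Int × (List (Int × List Int)) × (List (Int × List Int)) :=
  (1, [(1, [2, 3]), (2, [4])], [(2, [0, 1]), (3, [0, 5]), (4, [0, 0])])

def Spec_dfs (start : Int) (c : List (Int × List Int)) (p : List (Int × List Int)) (out : Int) : Prop := out = dfs_alt start c p
instance (start : Int) (c : List (Int × List Int)) (p : List (Int × List Int)) (out : Int) : Decidable (Spec_dfs start c p out) := by unfold Spec_dfs; infer_instance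

-- ===== CLAIM (what is proved, stated in full; the proofs are below) =====
def Claim_equal_dfs : Prop := ∀ (start : Int) (c : List (Int × List Int)) (p : List (Int × List Int)), Dom_dfs start c p → Pre_dfs start c p → Spec_dfs start c p (dfs start c p)

-- ===== LEMMAS AND PROOFS =====

theorem alget_mem {m : List (Int × List Int)} {k : Int} {v : List Int}
    (h : alget m k = some v) : (k, v) ∈ m := by
  induction m with
  | nil => simp [alget] at h
  | cons kv rest ih =>
    simp only [alget] at h
    split at h
    · rename_i he; cases h; obtain ⟨k1, v1⟩ := kv; cases he; simp
    · exact List.mem_cons_of_mem _ (ih h)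

-- Finset counterpart of the closure (used only by the proofs; reachL is its list implementation)
def keysF (c : List (Int × List Int)) : Finset Int := (c.map Prod.fst).toFinset

def childF (c : List (Int × List Int)) (s : Finset Int) : Finset Int :=
  c.foldr (fun kv acc => if kv.1 ∈ s then kv.2.toFinset ∪ acc else acc) ∅

def stepR (c : List (Int × List Int)) (s : Finset Int) : Finset Int := s ∪ childF c s

def reach (c : List (Int × List Int)) (start : Int) : Finset Int :=
  (stepR c)^[c.length + 1] {start}

theorem toFinset_childL (c : List (Int × List Int)) (s : List Int) :
    ((c.filter (fun kv => decide (kv.1 ∈ s))).flatMap (fun kv => kv.2)).toFinset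
      = childF c s.toFinset := by
  induction c with
  | nil => rfl
  | cons a rest ih =>
    unfold childF
    simp only [List.foldr_cons]
    by_cases hc : a.1 ∈ s
    · rw [if_pos (List.mem_toFinset.mpr hc)]
      simp [hc, List.toFinset_append, ih]
      simp [childF, List.mem_toFinset]
    · rw [if_neg (fun h => hc (List.mem_toFinset.mp h))]
      simp [hc, ih]
      simp [childF, List.mem_toFinset]

theorem toFinset_stepL (c : List (Int × List Int)) (s : List Int) :
    (stepL c s).toFinset = stepR c s.toFinset := by
  unfold stepL stepR
  rw [List.toFinset_append, toFinset_childL]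

theorem toFinset_reachL (c : List (Int × List Int)) (start : Int) :
    (reachL c start).toFinset = reach c start := by
  unfold reachL reach
  generalize c.length + 1 = k
  induction k with
  | zero => simp
  | succ k ih =>
    rw [Function.iterate_succ_apply', Function.iterate_succ_apply', toFinset_stepL, ih]

theorem mem_reachL_iff (c : List (Int × List Int)) (start x : Int) :
    x ∈ reachL c start ↔ x ∈ reach c start := by
  rw [← toFinset_reachL, List.mem_toFinset]

theorem mem_childF {c : List (Int × List Int)} {kv : Int × List Int} {s : Finset Int} {ch : Int}
    (hkv : kv ∈ c) (hs : kv.1 ∈ s) (hch : ch ∈ kv.2) : ch ∈ childF c s := by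
  induction c with
  | nil => cases hkv
  | cons a rest ih =>
    unfold childF
    simp only [List.foldr_cons]
    rcases List.mem_cons.mp hkv with h | h
    · subst h; rw [if_pos hs]; exact Finset.mem_union_left _ (List.mem_toFinset.mpr hch)
    · split
      · exact Finset.mem_union_right _ (ih h)
      · exact ih h

theorem childF_congr {c : List (Int × List Int)} {s t : Finset Int}
    (h : ∀ k ∈ c.map Prod.fst, (k ∈ s ↔ k ∈ t)) : childF c s = childF c t := by
  induction c with
  | nil => rfl
  | cons a rest ih =>
    unfold childF
    simp only [List.foldr_cons]
    have ha : a.1 ∈ s ↔ a.1 ∈ t := h a.1 (by simp)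
    have ht : childF rest s = childF rest t :=
      ih (fun k hk => h k (List.mem_cons_of_mem _ hk))
    unfold childF at ht
    by_cases hc : a.1 ∈ s
    · rw [if_pos hc, if_pos (ha.mp hc), ht]
    · rw [if_neg hc, if_neg (fun hc' => hc (ha.mpr hc')), ht]

theorem childF_mono {c : List (Int × List Int)} {s t : Finset Int}
    (h : s ⊆ t) : childF c s ⊆ childF c t := by
  induction c with
  | nil => exact Finset.Subset.refl _
  | cons a rest ih =>
    unfold childF
    simp only [List.foldr_cons]
    have ih' := ih
    unfold childF at ih'
    by_cases hc : a.1 ∈ s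
    · rw [if_pos hc, if_pos (h hc)]
      exact Finset.union_subset_union (Finset.Subset.refl _) ih'
    · rw [if_neg hc]
      by_cases hc' : a.1 ∈ t
    
      · rw [if_pos hc']
        exact ih'.trans Finset.subset_union_right
      · rw [if_neg hc']
        exact ih'

theorem stepR_mono {c : List (Int × List Int)} {s t : Finset Int}
    (h : s ⊆ t) : stepR c s ⊆ stepR c t :=
  Finset.union_subset_union h (childF_mono h)

theorem subset_stepR (c : List (Int × List Int)) (s : Finset Int) : s ⊆ stepR c s :=
  Finset.subset_union_left

theorem stepR_fix {c : List (Int × List Int)} {s : Finset Int}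
    (h : stepR c s ∩ keysF c = s ∩ keysF c) : stepR c (stepR c s) = stepR c s := by
  have hcongr : childF c (stepR c s) = childF c s := by
    apply childF_congr
    intro k hk
    have hkK : k ∈ keysF c := List.mem_toFinset.mpr hk
    constructor
    · intro hks
      have : k ∈ s ∩ keysF c := h ▸ Finset.mem_inter.mpr ⟨hks, hkK⟩
      exact (Finset.mem_inter.mp this).1
    · intro hkt; exact subset_stepR c s hkt
  show stepR c s ∪ childF c (stepR c s) = stepR c s
  rw [hcongr]
  show (s ∪ childF c s) ∪ childF c s = s ∪ childF c s
  rw [Finset.union_assoc, Finset.union_self]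

theorem stepR_saturates (c : List (Int × List Int)) :
    ∀ (m : Nat) (s : Finset Int), (keysF c).card ≤ m + (s ∩ keysF c).card →
      stepR c ((stepR c)^[m + 1] s) = (stepR c)^[m + 1] s := by
  intro m
  induction m with
  | zero =>
    intro s h
    have hsK : s ∩ keysF c = keysF c :=
      Finset.eq_of_subset_of_card_le Finset.inter_subset_right (by omega)
    have hfix : stepR c s ∩ keysF c = s ∩ keysF c := by
      apply Finset.Subset.antisymm
      · rw [hsK]; exact Finset.inter_subset_right
      · exact Finset.inter_subset_inter (subset_stepR c s) (Finset.Subset.refl _)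
    simpa using stepR_fix hfix
  | succ m ih =>
    intro s h
    by_cases hEq : stepR c s ∩ keysF c = s ∩ keysF c
    · have hf := stepR_fix hEq
      have : (stepR c)^[m + 1 + 1] s = stepR c s := by
        rw [Function.iterate_succ_apply]
        exact Function.iterate_fixed hf (m + 1)
      rw [this, hf]
    · have hsub : s ∩ keysF c ⊆ stepR c s ∩ keysF c :=
        Finset.inter_subset_inter (subset_stepR c s) (Finset.Subset.refl _)
      have hlt : (s ∩ keysF c).card < (stepR c s ∩ keysF c).card :=
        Finset.card_lt_card ⟨hsub, fun hsub' => hEq (Finset.Subset.antisymm hsub' hsub)⟩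
      rw [Function.iterate_succ_apply]
      exact ih (stepR c s) (by omega)

theorem reach_fix (c : List (Int × List Int)) (start : Int) :
    stepR c (reach c start) = reach c start := by
  have hK : (keysF c).card ≤ c.length :=
    le_trans (List.toFinset_card_le _) (by simp)
  exact stepR_saturates c c.length {start} (by omega)

theorem reach_closed {c : List (Int × List Int)} {start : Int} {kv : Int × List Int} {ch : Int}
    (hkv : kv ∈ c) (hr : kv.1 ∈ reach c start) (hch : ch ∈ kv.2) : ch ∈ reach c start := by
  have h1 : ch ∈ childF c (reach c start) := mem_childF hkv hr hch
  have h2 : ch ∈ stepR c (reach c start) := Finset.mem_union_right _ h1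
  rwa [reach_fix] at h2

theorem subset_iterate_stepR (c : List (Int × List Int)) (s : Finset Int) :
    ∀ k, s ⊆ (stepR c)^[k] s := by
  intro k
  induction k with
  | zero => simp
  | succ k ih =>
    rw [Function.iterate_succ_apply']
    exact ih.trans (subset_stepR c _)

theorem start_mem_reach (c : List (Int × List Int)) (start : Int) : start ∈ reach c start :=
  subset_iterate_stepR c {start} _ (Finset.mem_singleton_self start)

theorem reach_subset_closed {c : List (Int × List Int)} {S : Finset Int} {x : Int}
    (hS : stepR c S = S) (hx : x ∈ S) : reach c x ⊆ S := by
  unfold reach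
  generalize c.length + 1 = k
  induction k with
  | zero => simpa using Finset.singleton_subset_iff.mpr hx
  | succ k ih =>
    rw [Function.iterate_succ_apply']
    exact (stepR_mono ih).trans (le_of_eq hS)

theorem mem_reach_step {c : List (Int × List Int)} {n ch : Int} {l : List Int}
    (hkey : alget c n = some l) (hch : ch ∈ l) : ch ∈ reach c n := by
  have h1 : ch ∈ childF c {n} := mem_childF (alget_mem hkey) (Finset.mem_singleton_self n) hch
  have h2 : ch ∈ stepR c {n} := Finset.mem_union_right _ h1
  unfold reach
  rw [Function.iterate_succ_apply]
  exact subset_iterate_stepR c _ _ h2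

-- termination measure: number of keys of c reachable from n
def muR (c : List (Int × List Int)) (n : Int) : Nat := (reach c n ∩ keysF c).card

theorem key_mem_keysF {c : List (Int × List Int)} {n : Int}
    (h : (alget c n).isSome) : n ∈ keysF c := by
  obtain ⟨v, hv⟩ := Option.isSome_iff_exists.mp h
  exact List.mem_toFinset.mpr (List.mem_map.mpr ⟨(n, v), alget_mem hv, rfl⟩)

theorem mu_pos {c : List (Int × List Int)} {n : Int}
    (h : (alget c n).isSome) : 1 ≤ muR c n := by
  have : n ∈ reach c n ∩ keysF c :=
    Finset.mem_inter.mpr ⟨start_mem_reach c n, key_mem_keysF h⟩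
  exact Finset.card_pos.mpr ⟨n, this⟩

theorem mu_le (c : List (Int × List Int)) (n : Int) : muR c n ≤ c.length :=
  le_trans (Finset.card_le_card Finset.inter_subset_right)
    (le_trans (List.toFinset_card_le _) (by simp))

-- acyclicity (the content of Pre_dfs, in Finset form): a key reachable from start is not reachable from its children
theorem mu_lt {c : List (Int × List Int)} {start n ch : Int} {l : List Int}
    (hacy : ∀ kv ∈ c, kv.1 ∈ reach c start → ∀ ch' ∈ kv.2, kv.1 ∉ reach c ch')
    (hn : n ∈ reach c start) (hkey : alget c n = some l) (hch : ch ∈ l) :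
    muR c ch < muR c n := by
  have hsub : reach c ch ⊆ reach c n :=
    reach_subset_closed (reach_fix c n) (mem_reach_step hkey hch)
  have hnin : n ∉ reach c ch := hacy (n, l) (alget_mem hkey) hn ch hch
  have hmem : n ∈ reach c n ∩ keysF c :=
    Finset.mem_inter.mpr ⟨start_mem_reach c n, key_mem_keysF (by simp [hkey])⟩
  apply Finset.card_lt_card
  constructor
  · exact Finset.inter_subset_inter hsub (Finset.Subset.refl _)
  · intro hsub'
    exact hnin (Finset.mem_inter.mp (hsub' hmem)).1

-- B's value for one stack entry (the subtree count B's visit computes for it)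
def visitTop (c p : List (Int × List Int)) (n d : Int) : Int :=
  match alget c n with
  | none => 0
  | some children => visitGo c p (c.length + 1) d children

def stackS (c p : List (Int × List Int)) (st : List (Int × Int)) : Int :=
  (st.map (fun e => visitTop c p e.1 e.2)).sum

-- fuel-independent characterisation of B's visit: its value is the per-child one-liner plus the subtree values
theorem visitGo_char (c p : List (Int × List Int)) (start : Int)
    (hacy : ∀ kv ∈ c, kv.1 ∈ reach c start → ∀ ch' ∈ kv.2, kv.1 ∉ reach c ch') :
    ∀ (k : Nat), ∀ (l : List Int) (f : Nat) (d : Int),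
      (∀ ch ∈ l, ch ∈ reach c start) →
      (∀ ch ∈ l, (alget c ch).isSome → muR c ch ≤ k ∧ muR c ch ≤ f) →
      visitGo c p f d l
        = (l.map (fun ch => if pval p ch > d then (1 : Int) else 0)).sum
          + stackS c p (l.map (fun ch => (ch, d + 1))) := by
  intro k
  induction k using Nat.strong_induction_on with
  | _ k ihk =>
    intro l
    induction l with
    | nil => intro f d _ _; simp [visitGo, stackS]
    | cons ch rest ihl =>
      intro f d hreach hbound
      have hch : ch ∈ reach c start := hreach ch (by simp)
      have htail := ihl f d (fun x hx => hreach x (List.mem_cons_of_mem _ hx))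
            (fun x hx h => hbound x (List.mem_cons_of_mem _ hx) h)
      cases hg : alget c ch with
      | none =>
        have hstep : visitGo c p f d (ch :: rest)
            = (if pval p ch > d then 1 else 0) + 0 + visitGo c p f d rest := by
          cases f <;> simp [visitGo, hg]
        have hv : visitTop c p ch (d + 1) = 0 := by unfold visitTop; simp [hg]
        rw [hstep, htail]
        simp only [List.map_cons, List.sum_cons, stackS, hv]
        ring
      | some l' =>
        have hb := hbound ch (by simp) (by simp [hg])
        have h1 : 1 ≤ muR c ch := mu_pos (by simp [hg])
        obtain ⟨f', rfl⟩ : ∃ f', f = f' + 1 := ⟨f - 1, by omega⟩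
        have hstep : visitGo c p (f' + 1) d (ch :: rest)
            = (if pval p ch > d then 1 else 0) + visitGo c p f' (d + 1) l'
              + visitGo c p (f' + 1) d rest := by
          simp [visitGo, hg]
        -- children of ch, with the smaller bound muR c ch - 1 < k
        have hr' : ∀ x ∈ l', x ∈ reach c start :=
          fun x hx => reach_closed (alget_mem hg) hch hx
        have hb' : ∀ bnd : Nat, muR c ch ≤ bnd + 1 →
            ∀ x ∈ l', (alget c x).isSome → muR c x ≤ muR c ch - 1 ∧ muR c x ≤ bnd := by
          intro bnd hbnd x hx hxk
          have := mu_lt hacy hch hg hx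
          omega
        have e1 := ihk (muR c ch - 1) (by omega) l' f' (d + 1) hr'
          (hb' f' (by omega))
        have e2 := ihk (muR c ch - 1) (by omega) l' (c.length + 1) (d + 1) hr'
          (hb' (c.length + 1) (by have := mu_le c ch; omega))
        have hv : visitTop c p ch (d + 1) = visitGo c p f' (d + 1) l' := by
          unfold visitTop; rw [hg]; exact e2.trans e1.symm
        rw [hstep, htail]
        simp only [List.map_cons, List.sum_cons, stackS, hv]
        ring

-- weight of a stack entry / measure of a stack (decreases at every popped entry)
def wB (c : List (Int × List Int)) : Nat := (c.map (fun kv => kv.2.length)).sum + 1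

def entryW (c : List (Int × List Int)) (e : Int × Int) : Nat :=
  match alget c e.1 with
  | none => 0
  | some _ => wB c ^ (muR c e.1 + 1)

def stackM (c : List (Int × List Int)) (st : List (Int × Int)) : Nat :=
  st.length + (st.map (entryW c)).sum

theorem foldA_char (p : List (Int × List Int)) (d : Int) :
    ∀ (l : List Int) (rest : List (Int × Int)) (ans : Int),
      l.foldl (fun (s : List (Int × Int) × Int) ch =>
        ((ch, d + 1) :: s.1, s.2 + if pval p ch > d then 1 else 0)) (rest, ans)
      = ((l.map (fun ch => (ch, d + 1))).reverse ++ rest,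
         ans + (l.map (fun ch => if pval p ch > d then (1 : Int) else 0)).sum) := by
  intro l
  induction l with
  | nil => intro rest ans; simp
  | cons a l ih =>
    intro rest ans
    simp only [List.foldl_cons, ih, List.map_cons, List.reverse_cons, List.sum_cons]
    simp only [Prod.mk.injEq, List.append_assoc, List.singleton_append]
    exact ⟨trivial, by ring⟩

theorem children_le_sum {c : List (Int × List Int)} {n : Int} {l : List Int}
    (h : alget c n = some l) : l.length ≤ (c.map (fun kv => kv.2.length)).sum := by
  obtain ⟨s, t, rfl⟩ := List.append_of_mem (alget_mem h)
  simp
  omega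

theorem stackM_decrease {c : List (Int × List Int)} {n : Int} {l : List Int}
    (hkey : alget c n = some l)
    (hmono : ∀ ch ∈ l, (alget c ch).isSome → muR c ch < muR c n)
    (d : Int) (rest : List (Int × Int)) :
    stackM c ((l.map (fun ch => (ch, d + 1))).reverse ++ rest) < stackM c ((n, d) :: rest) := by
  unfold stackM
  simp only [List.length_append, List.length_reverse, List.length_map, List.map_append,
    List.map_reverse, List.sum_append, List.sum_reverse, List.map_map, List.length_cons,
    List.map_cons, List.sum_cons, Function.comp_def]
  have hW : entryW c (n, d) = wB c ^ (muR c n + 1) := by unfold entryW; simp [hkey]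
  rw [hW]
  have hB1 : 1 ≤ wB c := by unfold wB; omega
  have hlen : l.length ≤ wB c - 1 := by
    have := children_le_sum hkey; unfold wB; omega
  by_cases h0 : muR c n = 0
  · -- no key children possible: all weights 0
    have hz : ∀ x ∈ l.map (fun ch => entryW c (ch, d + 1)), x = 0 := by
      intro x hx
      obtain ⟨ch, hch, rfl⟩ := List.mem_map.mp hx
      unfold entryW
      cases hg : alget c ch with
      | none => simp
      | some _ =>
        exfalso
        have := hmono ch hch (by simp [hg])
        omega
    rw [List.sum_eq_zero hz, h0]
    have hw1 : wB c ^ (0 + 1) = wB c := by ring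
    omega
  · have hK : wB c ≤ wB c ^ (muR c n) := by
      calc wB c = wB c ^ 1 := (pow_one _).symm
        _ ≤ wB c ^ (muR c n) := Nat.pow_le_pow_right hB1 (by omega)
    have hbound : ∀ x ∈ l.map (fun ch => entryW c (ch, d + 1)),
        x ≤ wB c ^ (muR c n) := by
      intro x hx
      obtain ⟨ch, hch, rfl⟩ := List.mem_map.mp hx
      unfold entryW
      cases hg : alget c ch with
      | none => simp
      | some _ =>
        simp only
        exact Nat.pow_le_pow_right hB1
          (by have := hmono ch hch (by simp [hg]); omega)
    have hsum := List.sum_le_card_nsmul _ _ hbound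
    simp only [List.length_map, smul_eq_mul] at hsum
    have hpow : wB c ^ (muR c n + 1) = wB c * wB c ^ (muR c n) := by ring
    rw [hpow]
    have h1 : l.length * wB c ^ muR c n ≤ (wB c - 1) * wB c ^ muR c n :=
      Nat.mul_le_mul_right _ hlen
    have h2 : (wB c - 1) * wB c ^ muR c n + wB c ^ muR c n = wB c * wB c ^ muR c n := by
      have heq : wB c - 1 + 1 = wB c := by omega
      calc (wB c - 1) * wB c ^ muR c n + wB c ^ muR c n
          = (wB c - 1 + 1) * wB c ^ muR c n := by ring
        _ = wB c * wB c ^ muR c n := by rw [heq]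
    omega

theorem dfsRun_eq (c p : List (Int × List Int)) (start : Int)
    (hacy : ∀ kv ∈ c, kv.1 ∈ reach c start → ∀ ch' ∈ kv.2, kv.1 ∉ reach c ch') :
    ∀ (fuel : Nat) (st : List (Int × Int)) (ans : Int),
      (∀ e ∈ st, e.1 ∈ reach c start) → stackM c st ≤ fuel →
      dfsRun c p fuel st ans = ans + stackS c p st := by
  intro fuel
  induction fuel with
  | zero =>
    intro st ans _ h
    have : st = [] := by
      cases st with
      | nil => rfl
      | cons a l => exfalso; unfold stackM at h; simp at h
    subst this
    simp [dfsRun, stackS]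
  | succ f ih =>
    intro st ans hinv h
    cases st with
    | nil => simp [dfsRun, stackS]
    | cons e rest =>
      obtain ⟨n, d⟩ := e
      have hn : n ∈ reach c start := hinv (n, d) (by simp)
      have hinvr : ∀ e ∈ rest, e.1 ∈ reach c start := fun e he => hinv e (by simp [he])
      rw [dfsRun]
      cases hg : alget c n with
      | none =>
        have hM : stackM c rest ≤ f := by unfold stackM at h ⊢; simp at h; omega
        rw [ih rest ans hinvr hM]
        unfold stackS
        simp only [List.map_cons, List.sum_cons]
        have : visitTop c p n d = 0 := by unfold visitTop; simp [hg]
        rw [this]; ring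
      | some l =>
        simp only
        rw [foldA_char]
        dsimp only
        have hmono : ∀ ch ∈ l, (alget c ch).isSome → muR c ch < muR c n :=
          fun ch hch _hk => mu_lt hacy hn hg hch
        have hM := stackM_decrease hg hmono d rest
        have hinv' : ∀ e ∈ (l.map (fun ch => (ch, d + 1))).reverse ++ rest,
            e.1 ∈ reach c start := by
          intro e he
          rcases List.mem_append.mp he with hmem | hmem
          · obtain ⟨ch, hch, rfl⟩ := List.mem_map.mp (List.mem_reverse.mp hmem)
            exact reach_closed (alget_mem hg) hn hch
          · exact hinvr e hmem
        rw [ih _ _ hinv' (by omega)]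
        unfold stackS
        simp only [List.map_append, List.map_reverse, List.sum_append, List.sum_reverse,
          List.map_map, List.map_cons, List.sum_cons]
        have hv : visitTop c p n d = visitGo c p (c.length + 1) d l := by
          unfold visitTop; simp [hg]
        have hchar := visitGo_char c p start hacy c.length l (c.length + 1) d
          (fun ch hch => reach_closed (alget_mem hg) hn hch)
          (fun ch hch _hk => by
            have := mu_lt hacy hn hg hch
            have := mu_le c n
            omega)
        rw [hv, hchar]
        unfold stackS
        simp only [List.map_map]
        ring

-- ===== VERDICT (by name: the statement is the Claim_ definition above) =====
theorem dfs_spec : Claim_equal_dfs := by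
  intro start c p _hdom hpre
  unfold Spec_dfs dfs
  have hacy : ∀ kv ∈ c, kv.1 ∈ reach c start → ∀ ch' ∈ kv.2, kv.1 ∉ reach c ch' := by
    intro kv hkv hr ch hch hbad
    exact (hpre kv hkv ((mem_reachL_iff c start kv.1).mpr hr) ch hch).1
      ((mem_reachL_iff c ch kv.1).mpr hbad)
  have hM : stackM c [(start, 0)] ≤ dfsFuel c := by
    unfold stackM dfsFuel
    simp only [List.length_cons, List.length_nil, List.map_cons, List.map_nil,
      List.sum_cons, List.sum_nil]
    have : entryW c (start, 0) ≤ wB c ^ (c.length + 1) := by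
      unfold entryW
      cases hg : alget c start with
      | none => simp
      | some _ =>
        simp only
        exact Nat.pow_le_pow_right (by unfold wB; omega)
          (by have := mu_le c start; omega)
    unfold wB at this
    omega
  have hinv0 : ∀ e ∈ [((start : Int), (0 : Int))], e.1 ∈ reach c start := by
    intro e he; simp at he; subst he; exact start_mem_reach c start
  rw [dfsRun_eq c p start hacy (dfsFuel c) [(start, 0)] 0 hinv0 hM]
  unfold stackS dfs_alt visitTop
  cases hg : alget c start with
  | none => simp [hg]
  | some l => simp [hg]
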